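-- pv_equiv track=rewrite | github.com/whr819987540/DH | func.py | get_big_prime_generator
-- ===== SOURCE A (Python) =====
-- def get_big_prime_generator(p: int):
--     """
--     生成大素数的原根
--     """
--     a = p - 1
--     while a >= 2:
--         flag = 1
--         while flag != p:
--             if (a ** flag) % p == 1:
--                 break
--             flag += 1
--         if flag == (p - 1):
--             return a
--         a -= 1
-- ===== SOURCE B (Python) =====
-- def get_big_prime_generator(p: int):
--     """
--     生成大素数的原根 (largest primitive root mod p), via modular exponentiation
--     and the prime factorization of p-1 instead of trying every exponent.
--     """
--     if p < 3:
--         return None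
--     n = p - 1
--     # distinct prime factors of n by trial division
--     qs = []
--     m = n
--     d = 2
--     while d * d <= m:
--         if m % d == 0:
--             qs.append(d)
--             while m % d == 0:
--                 m = m // d
--         d += 1
--     if m > 1:
--         qs.append(m)
--     # a is a primitive root iff a^n == 1 and a^(n//q) != 1 for every prime q | n
--     for a in range(p - 1, 1, -1):
--         if pow(a, n, p) == 1 and all(pow(a, n // q, p) != 1 for q in qs):
--             return a
--     return None
-- ===== Notes on version B (the rewrite author's own statement) =====
-- stated objective: faster
-- what changed: Instead of testing every exponent flag=1..p with a giant bigint power a**flag for each candidate a, B factors p-1 once by trial division and tests each candidate with O(log p) modular exponentiations pow(a, (p-1)//q, p) over the prime factors q of p-1.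
import Mathlib
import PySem

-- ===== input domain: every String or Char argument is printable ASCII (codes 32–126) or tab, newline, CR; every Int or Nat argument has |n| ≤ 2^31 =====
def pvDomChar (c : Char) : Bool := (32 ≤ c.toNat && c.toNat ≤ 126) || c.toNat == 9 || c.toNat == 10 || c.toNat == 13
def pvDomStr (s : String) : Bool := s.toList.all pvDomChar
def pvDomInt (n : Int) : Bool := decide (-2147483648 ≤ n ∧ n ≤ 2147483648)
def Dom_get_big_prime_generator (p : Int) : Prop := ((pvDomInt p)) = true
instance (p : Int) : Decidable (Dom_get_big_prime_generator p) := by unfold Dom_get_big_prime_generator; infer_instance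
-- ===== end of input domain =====

-- B replaces A's trial of every exponent flag = 1..p with bigint powers a**flag by one trial-division
-- factorization of p-1 plus O(log p)-size modular-exponentiation tests; objective: faster (asymptotic).

-- ===== PORT A =====
-- inner loop: `flag = 1; while flag != p: if (a ** flag) % p == 1: break; flag += 1`
-- (fuel p.toNat is enough: flag runs 1,2,…,p; the fuel-0 branch is never reached)
def pvInnerA (a p : Int) : Nat → Int → Int
  | 0, flag => flag
  | f + 1, flag =>
    if flag = p then flag
    else if PySem.Int.mod (a ^ flag.toNat) p = 1 then flag
    else pvInnerA a p f (flag + 1)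

-- outer loop: `a = p - 1; while a >= 2: … ; a -= 1`, falling off the end returns None
def pvOuterA (p : Int) : Nat → Int → Option Int
  | 0, _ => none
  | f + 1, a =>
    if 2 ≤ a then
      if pvInnerA a p p.toNat 1 = p - 1 then some a
      else pvOuterA p f (a - 1)
    else none

def get_big_prime_generator (p : Int) : Option Int := pvOuterA p (p.toNat + 1) (p - 1)

-- ===== PORT B =====
-- `while m % d == 0: m //= d`  (fuel m.toNat suffices; m shrinks by a factor ≥ 2 each division)
def pvDivOut (d : Int) : Nat → Int → Int
  | 0, m => m
  | f + 1, m => if PySem.Int.mod m d = 0 then pvDivOut d f (PySem.Int.floordiv m d) else m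

-- `while d * d <= m: if m % d == 0: qs.append(d); <divide out d>; d += 1`
def pvFactorLoop : Nat → Int → Int → List Int → List Int × Int
  | 0, m, _, qs => (qs, m)
  | f + 1, m, d, qs =>
    if d * d ≤ m then
      if PySem.Int.mod m d = 0 then
        pvFactorLoop f (pvDivOut d m.toNat m) (d + 1) (qs ++ [d])
      else pvFactorLoop f m (d + 1) qs
    else (qs, m)

-- `for a in range(p - 1, 1, -1): if pow(a, n, p) == 1 and all(pow(a, n // q, p) != 1 for q in qs): return a`
def pvSearchB (p n : Int) (qs : List Int) : Nat → Int → Option Int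
  | 0, _ => none
  | f + 1, a =>
    if 2 ≤ a then
      if PySem.Int.powMod a n.toNat p = 1 ∧
          ∀ q ∈ qs, PySem.Int.powMod a (PySem.Int.floordiv n q).toNat p ≠ 1 then some a
      else pvSearchB p n qs f (a - 1)
    else none

def get_big_prime_generator_alt (p : Int) : Option Int :=
  if p < 3 then none
  else
    let n := p - 1
    let fr := pvFactorLoop (n.toNat + 2) n 2 []
    let qs := if 1 < fr.2 then fr.1 ++ [fr.2] else fr.1
    pvSearchB p n qs (p.toNat + 1) (p - 1)

-- ===== PRECONDITION & SPEC =====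
def Spec_get_big_prime_generator (p : Int) (out : Option Int) : Prop := out = get_big_prime_generator_alt p
instance (p : Int) (out : Option Int) : Decidable (Spec_get_big_prime_generator p out) := by unfold Spec_get_big_prime_generator; infer_instance

-- ===== CLAIM (what is proved, stated in full; the proofs are below) =====
def Claim_equal_get_big_prime_generator : Prop := ∀ (p : Int), Dom_get_big_prime_generator p → Spec_get_big_prime_generator p (get_big_prime_generator p)

-- ===== LEMMAS AND PROOFS =====

-- `2 ≤ r and r has no divisor in [2, r)` — the shape of primality the trial division delivers
def pvPrimeLike (r : Int) : Prop := 2 ≤ r ∧ ∀ e : Int, 2 ≤ e → e < r → ¬ e ∣ r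

lemma pvPowEmod (a p : Int) (k : Nat) : (a % p) ^ k % p = a ^ k % p := by
  induction k with
  | zero => simp
  | succ k ih => rw [pow_succ, pow_succ, Int.mul_emod, ih, Int.emod_emod_of_dvd _ dvd_rfl, ← Int.mul_emod]

lemma pvPrimeLike_prime (r : Int) (h : pvPrimeLike r) : Prime r := by
  obtain ⟨h2, hnd⟩ := h
  have hr : r = (r.toNat : Int) := by omega
  have hnp : r.toNat.Prime := by
    rw [Nat.prime_def_lt]
    refine ⟨by omega, fun m hm hdvd => ?_⟩
    by_contra hm1
    have hm0 : m ≠ 0 := by rintro rfl; simp at hdvd; omega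
    refine hnd (m : Int) (by omega) (by omega) ?_
    rw [hr]
    exact_mod_cast hdvd
  rw [hr]
  exact Nat.prime_iff_prime_int.mp hnp

lemma pvInnerA_at_p (a p : Int) (f : Nat) : pvInnerA a p (f + 1) p = p := by
  simp [pvInnerA]

-- characterization of A's inner loop
lemma pvInnerA_char (a p : Int) (hp : 3 ≤ p) :
    ∀ (f : Nat) (flag : Int), 1 ≤ flag → flag ≤ p - 1 → (p - flag).toNat < f →
    (pvInnerA a p f flag = p - 1 ↔
      (a ^ (p - 1).toNat % p = 1 ∧
       ∀ t : Nat, flag.toNat ≤ t → t < (p - 1).toNat → a ^ t % p ≠ 1)) := by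
  intro f
  induction f with
  | zero => intro flag h1 h2 h3; omega
  | succ f ih =>
    intro flag h1 h2 h3
    have hne : flag ≠ p := by omega
    rw [show pvInnerA a p (f + 1) flag
        = if PySem.Int.mod (a ^ flag.toNat) p = 1 then flag else pvInnerA a p f (flag + 1) by
      simp [pvInnerA, hne]]
    rw [PySem.Int.mod_eq_emod_of_pos (by omega)]
    by_cases hbrk : a ^ flag.toNat % p = 1
    · rw [if_pos hbrk]
      by_cases hend : flag = p - 1
      · subst hend
        constructor
        · intro _
          exact ⟨hbrk, fun t ht1 ht2 => by omega⟩
        · intro _; rfl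
      · constructor
        · intro h; exact absurd h hend
        · rintro ⟨_, hall⟩
          exact absurd hbrk (hall flag.toNat le_rfl (by omega))
    · rw [if_neg hbrk]
      by_cases hend : flag = p - 1
      · subst hend
        rw [show p - 1 + 1 = p by ring]
        have : pvInnerA a p f p = p := by
          obtain ⟨f', rfl⟩ : ∃ f', f = f' + 1 := ⟨f - 1, by omega⟩
          exact pvInnerA_at_p a p f'
        rw [this]
        constructor
        · intro h; omega
        · rintro ⟨h1', _⟩; exact absurd h1' hbrk
      · rw [ih (flag + 1) (by omega) (by omega) (by omega)]
        have htn : (flag + 1).toNat = flag.toNat + 1 := by omega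
        constructor
        · rintro ⟨hA, hall⟩
          refine ⟨hA, fun t ht1 ht2 => ?_⟩
          rcases Nat.eq_or_lt_of_le ht1 with heq | hlt
          · rw [← heq]; exact hbrk
          · exact hall t (by omega) ht2
        · rintro ⟨hA, hall⟩
          exact ⟨hA, fun t ht1 ht2 => hall t (by omega) ht2⟩

-- if t is the least positive exponent with a^t % p = 1, it divides every exponent m with a^m % p = 1
lemma pv_order_dvd (a p : Int) (hp : 3 ≤ p) (t : Nat) (ht1 : 1 ≤ t)
    (hmin : ∀ s : Nat, 1 ≤ s → s < t → a ^ s % p ≠ 1) (hord : a ^ t % p = 1)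
    (m : Nat) (hm : a ^ m % p = 1) : t ∣ m := by
  have h := Nat.div_add_mod m t
  have hr : m % t < t := Nat.mod_lt _ (by omega)
  have hrew : a ^ m % p = a ^ (m % t) % p := by
    conv_lhs => rw [← h]
    rw [pow_add, pow_mul, Int.mul_emod, ← pvPowEmod (a ^ t) p (m / t), hord, one_pow,
      Int.emod_eq_of_lt (by omega : (0:Int) ≤ 1) (by omega), one_mul, Int.emod_emod_of_dvd _ dvd_rfl]
  by_cases h0 : m % t = 0
  · exact Nat.dvd_of_mod_eq_zero h0
  · exact absurd (hrew ▸ hm) (hmin _ (by omega) hr)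

lemma pv_pow_dvd_one (a p : Int) (hp : 3 ≤ p) (t m : Nat) (hdvd : t ∣ m)
    (hord : a ^ t % p = 1) : a ^ m % p = 1 := by
  obtain ⟨k, rfl⟩ := hdvd
  rw [pow_mul, ← pvPowEmod (a ^ t) p k, hord, one_pow]
  exact Int.emod_eq_of_lt (by omega) (by omega)

lemma pvDivOut_spec (d : Int) (hd : 2 ≤ d) :
    ∀ (f : Nat) (m : Int), 1 ≤ m → m.toNat ≤ f →
      pvDivOut d f m ∣ m ∧ 1 ≤ pvDivOut d f m ∧ ¬ d ∣ pvDivOut d f m ∧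
      ∃ k : Nat, m = d ^ k * pvDivOut d f m := by
  intro f
  induction f with
  | zero => intro m hm hf; omega
  | succ f ih =>
    intro m hm hf
    by_cases hdvd : d ∣ m
    · obtain ⟨c, hc⟩ := hdvd
      have hc1 : 1 ≤ c := by nlinarith
      have hlt : c < m := by nlinarith
      have hfd : PySem.Int.floordiv m d = c := by
        rw [PySem.Int.floordiv_eq_ediv_of_pos (by omega), hc, Int.mul_ediv_cancel_left _ (by omega)]
      have hmod : PySem.Int.mod m d = 0 := (PySem.Int.mod_eq_zero_iff_dvd m d).mpr ⟨c, hc⟩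
      have hres : pvDivOut d (f + 1) m = pvDivOut d f c := by
        simp [pvDivOut, hmod, hfd]
      obtain ⟨h1, h2, h3, k, hk⟩ := ih c hc1 (by omega)
      refine ⟨?_, by omega, ?_, ?_⟩
      · exact hres ▸ h1.trans ⟨d, by linarith [hc]⟩
      · exact hres ▸ h3
      · refine ⟨k + 1, ?_⟩
        rw [hres, hc]
        conv_lhs => rw [hk]
        ring
    · have hmod : PySem.Int.mod m d ≠ 0 := fun h => hdvd ((PySem.Int.mod_eq_zero_iff_dvd m d).mp h)
      simp only [pvDivOut, if_neg hmod]
      exact ⟨dvd_rfl, hm, hdvd, 0, by ring⟩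

lemma pvFactorLoop_spec (n : Int) (_hn : 1 ≤ n) :
    ∀ (f : Nat) (m d : Int) (qs : List Int), 1 ≤ m → m ∣ n → 2 ≤ d →
      (∀ q ∈ qs, 2 ≤ q ∧ q ∣ n) →
      (∀ r : Int, pvPrimeLike r → r ∣ n → r ∈ qs ∨ r ∣ m) →
      (∀ e : Int, 2 ≤ e → e < d → ¬ e ∣ m) →
      (m + 1 - d).toNat < f →
      (∀ q ∈ (pvFactorLoop f m d qs).1, 2 ≤ q ∧ q ∣ n) ∧
      (1 ≤ (pvFactorLoop f m d qs).2 ∧ (pvFactorLoop f m d qs).2 ∣ n) ∧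
      (∀ r : Int, pvPrimeLike r → r ∣ n → r ∈ (pvFactorLoop f m d qs).1 ∨ r ∣ (pvFactorLoop f m d qs).2) ∧
      (∀ e : Int, 2 ≤ e → e * e ≤ (pvFactorLoop f m d qs).2 → ¬ e ∣ (pvFactorLoop f m d qs).2) := by
  intro f
  induction f with
  | zero => intro m d qs hm _ hd _ _ _ hf; omega
  | succ f ih =>
    intro m d qs hm hmn hd hqs hcomp hsmall hf
    by_cases hdm : d * d ≤ m
    · have hdlem : d ≤ m := by nlinarith
      by_cases hdvd : d ∣ m
      · have hmod : PySem.Int.mod m d = 0 := (PySem.Int.mod_eq_zero_iff_dvd m d).mpr hdvd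
        have hres : pvFactorLoop (f + 1) m d qs
            = pvFactorLoop f (pvDivOut d m.toNat m) (d + 1) (qs ++ [d]) := by
          simp [pvFactorLoop, hdm, hmod]
        obtain ⟨hdv1, hdv2, hdv3, k, hk⟩ := pvDivOut_spec d hd m.toNat m hm le_rfl
        set m2 := pvDivOut d m.toNat m with hm2
        -- d itself is prime-like here: no smaller e divides m, and d ∣ m
        have hdpl : pvPrimeLike d :=
          ⟨hd, fun e he1 he2 hed => hsmall e he1 he2 (hed.trans hdvd)⟩
        have hm2le : m2 ≤ m := Int.le_of_dvd (by omega) hdv1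
        rw [hres]
        apply ih
        · exact hdv2
        · exact hdv1.trans hmn
        · omega
        · intro q hq
          rcases List.mem_append.mp hq with h | h
          · exact hqs q h
          · simp at h; subst h; exact ⟨hd, hdvd.trans hmn⟩
        · intro r hr hrn
          rcases hcomp r hr hrn with h | h
          · exact Or.inl (List.mem_append.mpr (Or.inl h))
          · -- r ∣ m = d^k * m2 ; r prime
            have hrp := pvPrimeLike_prime r hr
            rw [hk] at h
            rcases hrp.dvd_mul.mp h with h' | h'
            · -- r ∣ d^k → r ∣ d → r = d
              have hrd : r ∣ d := hrp.dvd_of_dvd_pow h'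
              have : r = d := by
                have h1 : r ≤ d := Int.le_of_dvd (by omega) hrd
                by_contra hne
                exact hdpl.2 r hr.1 (by omega) hrd
              exact Or.inl (List.mem_append.mpr (Or.inr (by simp [this])))
            · exact Or.inr h'
        · intro e he1 he2 hedvd
          rcases lt_or_eq_of_le (show e ≤ d by omega) with h | h
          · exact hsmall e he1 h (hedvd.trans hdv1)
          · exact hdv3 (h ▸ hedvd)
        · omega
      · have hmod : PySem.Int.mod m d ≠ 0 :=
          fun h => hdvd ((PySem.Int.mod_eq_zero_iff_dvd m d).mp h)
        have hres : pvFactorLoop (f + 1) m d qs = pvFactorLoop f m (d + 1) qs := by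
          simp [pvFactorLoop, hdm, hmod]
        rw [hres]
        apply ih m (d + 1) qs hm hmn (by omega) hqs hcomp
        · intro e he1 he2 hedvd
          rcases lt_or_eq_of_le (show e ≤ d by omega) with h | h
          · exact hsmall e he1 h hedvd
          · exact hdvd (h ▸ hedvd)
        · omega
    · have hres : pvFactorLoop (f + 1) m d qs = (qs, m) := by
        simp [pvFactorLoop, hdm]
      rw [hres]
      refine ⟨hqs, ⟨hm, hmn⟩, fun r hr hrn => hcomp r hr hrn, fun e he1 he2 hedvd => ?_⟩
      have : ¬ e < d := fun h => hsmall e he1 h hedvd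
      nlinarith

-- the final list of factors: every element is a divisor ≥ 2 of n, every prime-like divisor of n is in it
lemma pvQs_spec (n : Int) (hn : 2 ≤ n) :
    (∀ q ∈ (if 1 < (pvFactorLoop (n.toNat + 2) n 2 []).2
              then (pvFactorLoop (n.toNat + 2) n 2 []).1 ++ [(pvFactorLoop (n.toNat + 2) n 2 []).2]
              else (pvFactorLoop (n.toNat + 2) n 2 []).1), 2 ≤ q ∧ q ∣ n) ∧
    (∀ r : Int, pvPrimeLike r → r ∣ n →
      r ∈ (if 1 < (pvFactorLoop (n.toNat + 2) n 2 []).2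
              then (pvFactorLoop (n.toNat + 2) n 2 []).1 ++ [(pvFactorLoop (n.toNat + 2) n 2 []).2]
              else (pvFactorLoop (n.toNat + 2) n 2 []).1)) := by
  obtain ⟨O1, ⟨Om1, Om2⟩, O3, O4⟩ :=
    pvFactorLoop_spec n (by omega) (n.toNat + 2) n 2 [] (by omega) dvd_rfl le_rfl
      (by simp) (fun r hr hrn => Or.inr hrn)
      (fun e he1 he2 => absurd he2 (by omega)) (by omega)
  set P := pvFactorLoop (n.toNat + 2) n 2 [] with hP
  constructor
  · intro q hq
    by_cases h : 1 < P.2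
    · rw [if_pos h] at hq
      rcases List.mem_append.mp hq with h' | h'
      · exact O1 q h'
      · simp at h'; subst h'; exact ⟨by omega, Om2⟩
    · rw [if_neg h] at hq
      exact O1 q hq
  · intro r hr hrn
    rcases O3 r hr hrn with h | h
    · by_cases h' : 1 < P.2
      · rw [if_pos h']; exact List.mem_append.mpr (Or.inl h)
      · rw [if_neg h']; exact h
    · have hr2 : 2 ≤ r := hr.1
      have hrle : r ≤ P.2 := Int.le_of_dvd (by omega) h
      have hbig : 1 < P.2 := by omega
      rw [if_pos hbig]
      refine List.mem_append.mpr (Or.inr ?_)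
      obtain ⟨s, hs⟩ := h
      have hs1 : 1 ≤ s := by nlinarith
      rcases eq_or_lt_of_le hs1 with h1 | h1
      · simp [hs, ← h1]
      · exfalso
        rcases le_or_gt r s with hle | hlt
        · exact O4 r hr2 (by nlinarith) ⟨s, hs⟩
        · exact O4 s (by omega) (by nlinarith) ⟨r, by rw [hs]; ring⟩

-- pointwise: A's inner-loop test agrees with B's factorization test
lemma pv_pred_iff (p : Int) (hp : 3 ≤ p) (qs : List Int)
    (hqs1 : ∀ q ∈ qs, 2 ≤ q ∧ q ∣ (p - 1))
    (hqs2 : ∀ r : Int, pvPrimeLike r → r ∣ (p - 1) → r ∈ qs) (a : Int) :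
    (pvInnerA a p p.toNat 1 = p - 1 ↔
      (PySem.Int.powMod a (p - 1).toNat p = 1 ∧
       ∀ q ∈ qs, PySem.Int.powMod a (PySem.Int.floordiv (p - 1) q).toNat p ≠ 1)) := by
  rw [pvInnerA_char a p hp p.toNat 1 (by omega) (by omega) (by omega)]
  simp only [PySem.Int.powMod_eq_emod _ _ (show (0:Int) < p by omega)]
  have h1t : (1 : Int).toNat = 1 := rfl
  rw [h1t]
  constructor
  · rintro ⟨h1, h2⟩
    refine ⟨h1, fun q hq hone => ?_⟩
    obtain ⟨hq2, c, hc⟩ := hqs1 q hq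
    have hc1 : 1 ≤ c := by nlinarith
    have hclt : c < p - 1 := by nlinarith
    have hfd : PySem.Int.floordiv (p - 1) q = c := by
      rw [PySem.Int.floordiv_eq_ediv_of_pos (by omega), hc,
        Int.mul_ediv_cancel_left _ (by omega)]
    rw [hfd] at hone
    exact h2 c.toNat (by omega) (by omega) hone
  · rintro ⟨h1, h2⟩
    refine ⟨h1, fun t ht1 ht2 habs => ?_⟩
    have hex : ∃ s, 1 ≤ s ∧ a ^ s % p = 1 := ⟨t, ht1, habs⟩
    have ht0 := Nat.find_spec hex
    set t0 := Nat.find hex with hdef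
    have ht0min : ∀ s, 1 ≤ s → s < t0 → a ^ s % p ≠ 1 :=
      fun s hs1 hs2 h => Nat.find_min hex hs2 ⟨hs1, h⟩
    have ht0le : t0 ≤ t := Nat.find_min' hex ⟨ht1, habs⟩
    have hdvdN : t0 ∣ (p - 1).toNat := pv_order_dvd a p hp t0 ht0.1 ht0min ht0.2 _ h1
    obtain ⟨K, hK⟩ := hdvdN
    have hK2 : 2 ≤ K := by
      by_contra h
      interval_cases K <;> omega
    have hqprime : K.minFac.Prime := Nat.minFac_prime (by omega)
    have hqK : K.minFac ∣ K := Nat.minFac_dvd K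
    set q := K.minFac with hqdef
    have hqN : q ∣ (p - 1).toNat := by rw [hK]; exact hqK.mul_left t0
    have hplq : pvPrimeLike (q : Int) := by
      refine ⟨by exact_mod_cast hqprime.two_le, fun e he1 he2 hed => ?_⟩
      have he : (e.toNat : Int) = e := by omega
      have hd : e.toNat ∣ q := by exact_mod_cast (he ▸ hed)
      rcases hqprime.eq_one_or_self_of_dvd _ hd with h | h <;> omega
    have hqdvdn : (q : Int) ∣ (p - 1) := by
      have hcast : ((p - 1).toNat : Int) = p - 1 := by omega
      rw [← hcast]
      exact_mod_cast hqN
    apply h2 (q : Int) (hqs2 (q : Int) hplq hqdvdn)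
    have hfd : (PySem.Int.floordiv (p - 1) (q : Int)).toNat = (p - 1).toNat / q := by
      rw [PySem.Int.floordiv_eq_ediv_of_pos (by exact_mod_cast hqprime.pos),
        show (p - 1 : Int) = ((p - 1).toNat : Int) by omega,
        ← Int.natCast_ediv, Int.toNat_natCast]
      simp
    rw [hfd]
    apply pv_pow_dvd_one a p hp t0 _ _ ht0.2
    obtain ⟨K2, hK2'⟩ := hqK
    have hdivq : (p - 1).toNat / q = t0 * K2 := by
      rw [hK, hK2', ← mul_assoc, mul_comm t0 q, mul_assoc,
        Nat.mul_div_cancel_left _ hqprime.pos]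
    rw [hdivq]
    exact Dvd.intro K2 rfl

lemma pv_scan_eq (p n : Int) (qs : List Int)
    (hpred : ∀ a : Int, 2 ≤ a →
      (pvInnerA a p p.toNat 1 = p - 1 ↔
        (PySem.Int.powMod a n.toNat p = 1 ∧
         ∀ q ∈ qs, PySem.Int.powMod a (PySem.Int.floordiv n q).toNat p ≠ 1))) :
    ∀ (f : Nat) (a : Int), pvOuterA p f a = pvSearchB p n qs f a := by
  intro f
  induction f with
  | zero => intro a; rfl
  | succ f ih =>
    intro a
    by_cases ha : 2 ≤ a
    · simp only [pvOuterA, pvSearchB, if_pos ha, ih]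
      exact if_congr (hpred a ha) rfl rfl
    · simp [pvOuterA, pvSearchB, ha]

-- ===== VERDICT (by name: the statement is the Claim_ definition above) =====
theorem get_big_prime_generator_spec : Claim_equal_get_big_prime_generator := by
  intro p _
  unfold Spec_get_big_prime_generator get_big_prime_generator get_big_prime_generator_alt
  by_cases hp : p < 3
  · have : ¬ (2 ≤ p - 1) := by omega
    simp [pvOuterA, hp, this]
  · rw [not_lt] at hp
    rw [if_neg (by omega)]
    have hqs := pvQs_spec (p - 1) (by omega)
    exact pv_scan_eq p (p - 1) _
      (fun a ha => pv_pred_iff p hp _ hqs.1 hqs.2 a) (p.toNat + 1) (p - 1)
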